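-- pv_equiv track=rewrite | github.com/20eung/ai-coding-safety | scripts/release_helper.py | analyze_commits
-- ===== SOURCE A (Python) =====
-- def analyze_commits(commits):
--     bump = "patch"
--     categorized = {
--         "breaking": [],
--         "feat": [],
--         "fix": [],
--         "docs": [],
--         "chore": []
--     }
--
--     for msg in commits:
--         low_msg = msg.lower()
--         if "breaking change:" in low_msg or "!" in msg.split(":")[0]:
--             categorized["breaking"].append(msg)
--             bump = "major"
--         elif low_msg.startswith("feat:"):
--             categorized["feat"].append(msg)
--             if bump == "patch": bump = "minor"
--         elif low_msg.startswith("fix:"):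
--             categorized["fix"].append(msg)
--         elif low_msg.startswith("docs:"):
--             categorized["docs"].append(msg)
--         else:
--             # chore, build, ci, refactor, style, test, perf...
--             if not low_msg.startswith("chore: version"): # skip version bump commits
--                 categorized["chore"].append(msg)
--
--     return bump, categorized
-- ===== SOURCE B (Python) =====
-- def _classify(msg):
--     low_msg = msg.lower()
--     if "breaking change:" in low_msg or "!" in msg.split(":")[0]:
--         return "breaking"
--     elif low_msg.startswith("feat:"):
--         return "feat"
--     elif low_msg.startswith("fix:"):
--         return "fix"
--     elif low_msg.startswith("docs:"):
--         return "docs"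
--     elif not low_msg.startswith("chore: version"):
--         return "chore"
--     else:
--         return "skip"
--
-- def analyze_commits(commits):
--     breaking = [m for m in commits if _classify(m) == "breaking"]
--     feat = [m for m in commits if _classify(m) == "feat"]
--     fix = [m for m in commits if _classify(m) == "fix"]
--     docs = [m for m in commits if _classify(m) == "docs"]
--     chore = [m for m in commits if _classify(m) == "chore"]
--     bump = "major" if breaking else ("minor" if feat else "patch")
--     return bump, {
--         "breaking": breaking,
--         "feat": feat,
--         "fix": fix,
--         "docs": docs,
--         "chore": chore,
--     }
-- ===== Notes on version B (the rewrite author's own statement) =====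
-- stated objective: alternative
-- what changed: Replaced the single stateful loop that threads a mutable bump accumulator and appends into a shared dict with a pure per-message classifier: each category is an independent filter of the commit list, and the bump level is derived afterwards from whether the breaking/feat categories are non-empty (valid because A's bump is order-independent).
import Mathlib
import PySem

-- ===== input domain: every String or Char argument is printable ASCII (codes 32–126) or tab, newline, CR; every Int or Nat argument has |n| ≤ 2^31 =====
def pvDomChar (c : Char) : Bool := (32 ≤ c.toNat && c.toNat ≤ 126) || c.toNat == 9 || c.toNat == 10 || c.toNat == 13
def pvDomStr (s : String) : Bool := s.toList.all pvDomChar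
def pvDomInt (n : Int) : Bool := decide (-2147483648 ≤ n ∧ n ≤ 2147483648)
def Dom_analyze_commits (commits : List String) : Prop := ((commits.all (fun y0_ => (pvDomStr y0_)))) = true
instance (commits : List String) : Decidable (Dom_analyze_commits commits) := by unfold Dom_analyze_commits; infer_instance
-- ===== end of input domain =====

-- B replaces A's stateful loop (mutable bump accumulator + appends into a shared dict) by a
-- pure per-message classifier, five independent filters, and a bump derived afterwards.

-- ===== PORT A =====
-- one step of A's for-loop; state = (bump, categorized).
-- msg.split(":")[0]: split? with a non-empty separator always returns some non-empty list,
-- so the getD []/headD "" fallbacks are never taken (exact).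
def pvStepA (st : String × PySem.Dict String (List String)) (msg : String) :
    String × PySem.Dict String (List String) :=
  let low_msg := PySem.Str.lower msg
  if PySem.Str.isIn "breaking change:" low_msg
      || PySem.Str.isIn "!" (((PySem.Str.split? msg ":").getD []).headD "") then
    ("major", st.2.modify "breaking" [] (· ++ [msg]))
  else if PySem.Str.startswith low_msg "feat:" then
    ((if st.1 == "patch" then "minor" else st.1), st.2.modify "feat" [] (· ++ [msg]))
  else if PySem.Str.startswith low_msg "fix:" then
    (st.1, st.2.modify "fix" [] (· ++ [msg]))
  else if PySem.Str.startswith low_msg "docs:" then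
    (st.1, st.2.modify "docs" [] (· ++ [msg]))
  else if !(PySem.Str.startswith low_msg "chore: version") then
    (st.1, st.2.modify "chore" [] (· ++ [msg]))
  else st

def analyze_commits (commits : List String) : String × (List (String × List String)) :=
  let init : PySem.Dict String (List String) :=
    PySem.Dict.ofList [("breaking", []), ("feat", []), ("fix", []), ("docs", []), ("chore", [])]
  let r := commits.foldl pvStepA ("patch", init)
  (r.1, r.2.items)

-- ===== PORT B =====
def pvClassify (msg : String) : String :=
  let low_msg := PySem.Str.lower msg
  if PySem.Str.isIn "breaking change:" low_msg
      || PySem.Str.isIn "!" (((PySem.Str.split? msg ":").getD []).headD "") then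
    "breaking"
  else if PySem.Str.startswith low_msg "feat:" then "feat"
  else if PySem.Str.startswith low_msg "fix:" then "fix"
  else if PySem.Str.startswith low_msg "docs:" then "docs"
  else if !(PySem.Str.startswith low_msg "chore: version") then "chore"
  else "skip"

def analyze_commits_alt (commits : List String) : String × (List (String × List String)) :=
  let breaking := commits.filter (fun m => pvClassify m == "breaking")
  let feat := commits.filter (fun m => pvClassify m == "feat")
  let fix := commits.filter (fun m => pvClassify m == "fix")
  let docs := commits.filter (fun m => pvClassify m == "docs")
  let chore := commits.filter (fun m => pvClassify m == "chore")
  let bump := if breaking ≠ [] then "major" else if feat ≠ [] then "minor" else "patch"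
  (bump, [("breaking", breaking), ("feat", feat), ("fix", fix), ("docs", docs), ("chore", chore)])

-- ===== PRECONDITION & SPEC =====
def Spec_analyze_commits (commits : List String) (out : String × (List (String × List String))) : Prop := out = analyze_commits_alt commits
instance (commits : List String) (out : String × (List (String × List String))) : Decidable (Spec_analyze_commits commits out) := by unfold Spec_analyze_commits; infer_instance

-- ===== CLAIM (what is proved, stated in full; the proofs are below) =====
def Claim_equal_analyze_commits : Prop := ∀ (commits : List String), Dom_analyze_commits commits → Spec_analyze_commits commits (analyze_commits commits)

-- ===== LEMMAS AND PROOFS =====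

-- the bump value A's loop produces, characterised from the classifier
def pvBumpOf (b0 : String) (commits : List String) : String :=
  if b0 == "major" || commits.any (fun m => pvClassify m == "breaking") then "major"
  else if b0 == "minor" || commits.any (fun m => pvClassify m == "feat") then "minor"
  else b0

-- A's loop step, expressed through B's classifier (the branch conditions are identical)
theorem pvStepA_eq (b0 : String) (d : PySem.Dict String (List String)) (m : String) :
    pvStepA (b0, d) m =
      ((if pvClassify m = "breaking" then "major"
        else if pvClassify m = "feat" then (if b0 == "patch" then "minor" else b0) else b0),
       (if pvClassify m = "skip" then d else d.modify (pvClassify m) [] (· ++ [m]))) := by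
  simp only [pvStepA, pvClassify]
  split_ifs <;> simp_all

theorem pvClassify_cases (m : String) :
    pvClassify m = "breaking" ∨ pvClassify m = "feat" ∨ pvClassify m = "fix" ∨
    pvClassify m = "docs" ∨ pvClassify m = "chore" ∨ pvClassify m = "skip" := by
  simp only [pvClassify]
  split_ifs <;> simp

-- Dict.modify at each of the five (always-present) literal keys
theorem pvMod_br (br ft fx dc ch : List String) (m : String) :
    (PySem.Dict.mk [("breaking", br), ("feat", ft), ("fix", fx), ("docs", dc), ("chore", ch)]).modify "breaking" [] (· ++ [m])
    = PySem.Dict.mk [("breaking", br ++ [m]), ("feat", ft), ("fix", fx), ("docs", dc), ("chore", ch)] := by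
  simp [PySem.Dict.modify, PySem.Dict.insert, PySem.Dict.get?, PySem.Dict.contains, PySem.Dict.getD]

theorem pvMod_ft (br ft fx dc ch : List String) (m : String) :
    (PySem.Dict.mk [("breaking", br), ("feat", ft), ("fix", fx), ("docs", dc), ("chore", ch)]).modify "feat" [] (· ++ [m])
    = PySem.Dict.mk [("breaking", br), ("feat", ft ++ [m]), ("fix", fx), ("docs", dc), ("chore", ch)] := by
  simp [PySem.Dict.modify, PySem.Dict.insert, PySem.Dict.get?, PySem.Dict.contains, PySem.Dict.getD]

theorem pvMod_fx (br ft fx dc ch : List String) (m : String) :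
    (PySem.Dict.mk [("breaking", br), ("feat", ft), ("fix", fx), ("docs", dc), ("chore", ch)]).modify "fix" [] (· ++ [m])
    = PySem.Dict.mk [("breaking", br), ("feat", ft), ("fix", fx ++ [m]), ("docs", dc), ("chore", ch)] := by
  simp [PySem.Dict.modify, PySem.Dict.insert, PySem.Dict.get?, PySem.Dict.contains, PySem.Dict.getD]

theorem pvMod_dc (br ft fx dc ch : List String) (m : String) :
    (PySem.Dict.mk [("breaking", br), ("feat", ft), ("fix", fx), ("docs", dc), ("chore", ch)]).modify "docs" [] (· ++ [m])
    = PySem.Dict.mk [("breaking", br), ("feat", ft), ("fix", fx), ("docs", dc ++ [m]), ("chore", ch)] := by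
  simp [PySem.Dict.modify, PySem.Dict.insert, PySem.Dict.get?, PySem.Dict.contains, PySem.Dict.getD]

theorem pvMod_ch (br ft fx dc ch : List String) (m : String) :
    (PySem.Dict.mk [("breaking", br), ("feat", ft), ("fix", fx), ("docs", dc), ("chore", ch)]).modify "chore" [] (· ++ [m])
    = PySem.Dict.mk [("breaking", br), ("feat", ft), ("fix", fx), ("docs", dc), ("chore", ch ++ [m])] := by
  simp [PySem.Dict.modify, PySem.Dict.insert, PySem.Dict.get?, PySem.Dict.contains, PySem.Dict.getD]

-- A's loop, fully characterised: bump is pvBumpOf, the dict appends the per-category filters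
theorem pvLoopA_char (commits : List String) (b0 : String)
    (hb : b0 = "patch" ∨ b0 = "minor" ∨ b0 = "major")
    (br ft fx dc ch : List String) :
    commits.foldl pvStepA
      (b0, PySem.Dict.mk [("breaking", br), ("feat", ft), ("fix", fx), ("docs", dc), ("chore", ch)])
    = (pvBumpOf b0 commits,
       PySem.Dict.mk
         [("breaking", br ++ commits.filter (fun m => pvClassify m == "breaking")),
          ("feat", ft ++ commits.filter (fun m => pvClassify m == "feat")),
          ("fix", fx ++ commits.filter (fun m => pvClassify m == "fix")),
          ("docs", dc ++ commits.filter (fun m => pvClassify m == "docs")),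
          ("chore", ch ++ commits.filter (fun m => pvClassify m == "chore"))]) := by
  induction commits generalizing b0 br ft fx dc ch with
  | nil =>
      rcases hb with h | h | h <;> subst h <;> simp [pvBumpOf]
  | cons m cs ih =>
      simp only [List.foldl_cons, pvStepA_eq]
      rcases pvClassify_cases m with hc | hc | hc | hc | hc | hc <;>
        simp only [hc, reduceIte, String.reduceEq, pvMod_br, pvMod_ft, pvMod_fx, pvMod_dc, pvMod_ch]
      · rw [ih "major" (by tauto)]
        rcases hb with h | h | h <;> subst h <;> simp [pvBumpOf, hc]
      · rw [ih _ (by rcases hb with h | h | h <;> subst h <;> simp)]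
        rcases hb with h | h | h <;> subst h <;> simp [pvBumpOf, hc]
      · rw [ih b0 hb]
        simp [pvBumpOf, hc]
      · rw [ih b0 hb]
        simp [pvBumpOf, hc]
      · rw [ih b0 hb]
        simp [pvBumpOf, hc]
      · rw [ih b0 hb]
        simp [pvBumpOf, hc]

-- ===== VERDICT (by name: the statement is the Claim_ definition above) =====
theorem analyze_commits_spec : Claim_equal_analyze_commits := by
  intro commits _
  unfold Spec_analyze_commits analyze_commits analyze_commits_alt
  have h0 : PySem.Dict.ofList
      ([("breaking", []), ("feat", []), ("fix", []), ("docs", []), ("chore", [])] :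
        List (String × List String))
      = PySem.Dict.mk [("breaking", []), ("feat", []), ("fix", []), ("docs", []), ("chore", [])] := by
    decide
  dsimp only []
  rw [h0, pvLoopA_char commits "patch" (by tauto)]
  simp only [List.nil_append]
  refine Prod.ext ?_ rfl
  simp only [pvBumpOf]
  by_cases hbr : commits.filter (fun m => pvClassify m == "breaking") = [] <;>
    by_cases hft : commits.filter (fun m => pvClassify m == "feat") = [] <;>
      [skip; skip; skip; skip] <;>
    simp only [List.filter_eq_nil_iff, beq_iff_eq, not_forall] at hbr hft <;>
    simp [hbr, hft]
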